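-- pv_equiv track=rewrite | github.com/Judongsung/algorithm | 프로그래머스/1/388351. 유연근무제/유연근무제.py | solution
-- ===== SOURCE A (Python) =====
-- def time_to_minutes(time):
--     return (time//100)*60+time%100
--
-- def solution(schedules, timelogs, startday):
--     answer = 0
--
--     for schedule, log in zip(schedules, timelogs):
--         limit = time_to_minutes(schedule)+10
--         saturday = (6-startday)%7
--         log = [log[i] for i in range(7) if not (saturday == i or (saturday+1)%7 == i)]
--         eventlog = sorted(log, reverse=True)
--         if time_to_minutes(eventlog[0]) <= limit:
--             answer += 1
--
--     return answer
-- ===== SOURCE B (Python) =====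
-- def time_to_minutes(time):
--     return (time//100)*60+time%100
--
-- def solution(schedules, timelogs, startday):
--     # single scan per employee: running max over weekday logins, no list, no sort
--     saturday = (6 - startday) % 7
--     sunday = (saturday + 1) % 7
--     answer = 0
--     for schedule, log in zip(schedules, timelogs):
--         limit = time_to_minutes(schedule) + 10
--         latest = None
--         for i in range(7):
--             if i != saturday and i != sunday:
--                 if latest is None or log[i] > latest:
--                     latest = log[i]
--         if time_to_minutes(latest) <= limit:
--             answer += 1
--     return answer
-- ===== Notes on version B (the rewrite author's own statement) =====
-- stated objective: simpler
-- what changed: Replaced build-filtered-list + descending sort + index-[0] with a single running-max scan over the weekday indices (saturday/sunday hoisted out of the loop), eliminating the intermediate list and the sort.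
import Mathlib
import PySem

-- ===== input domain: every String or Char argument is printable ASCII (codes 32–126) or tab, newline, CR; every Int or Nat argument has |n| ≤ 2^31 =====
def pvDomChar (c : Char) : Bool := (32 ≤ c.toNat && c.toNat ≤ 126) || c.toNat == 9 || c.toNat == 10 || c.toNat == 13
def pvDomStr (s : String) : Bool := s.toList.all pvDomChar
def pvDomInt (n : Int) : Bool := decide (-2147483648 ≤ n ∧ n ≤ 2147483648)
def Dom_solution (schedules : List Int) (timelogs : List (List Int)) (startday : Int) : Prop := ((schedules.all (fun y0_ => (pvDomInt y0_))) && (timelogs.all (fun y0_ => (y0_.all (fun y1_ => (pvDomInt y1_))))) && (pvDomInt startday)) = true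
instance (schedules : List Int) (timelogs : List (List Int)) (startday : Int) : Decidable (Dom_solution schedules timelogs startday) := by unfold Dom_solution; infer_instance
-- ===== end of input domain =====

-- B replaces A's build-filtered-list + descending sort + [0] by a single running-max scan
-- over the weekday indices, with saturday/sunday hoisted out of the main loop (simpler).

-- ===== PORT A =====
def time_to_minutes (time : Int) : Int :=
  PySem.Int.floordiv time 100 * 60 + PySem.Int.mod time 100

def solution (schedules : List Int) (timelogs : List (List Int)) (startday : Int) : Int :=
  (schedules.zip timelogs).foldl (fun answer p =>
    let schedule := p.1
    let log := p.2
    let limit := time_to_minutes schedule + 10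
    let saturday := PySem.Int.mod (6 - startday) 7
    -- log = [log[i] for i in range(7) if not (saturday == i or (saturday+1)%7 == i)]
    let log2 := ((PySem.List.pyRange 0 7 1).filter
        (fun i => !(saturday == i || PySem.Int.mod (saturday + 1) 7 == i))).map
        (fun i => PySem.List.pyGetD log i 0)
    let eventlog := PySem.List.sorted log2 (fun x => x) true
    if time_to_minutes (PySem.List.pyGetD eventlog 0 0) ≤ limit then answer + 1 else answer) 0

-- ===== PORT B =====
def solution_alt (schedules : List Int) (timelogs : List (List Int)) (startday : Int) : Int :=
  let saturday := PySem.Int.mod (6 - startday) 7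
  let sunday := PySem.Int.mod (saturday + 1) 7
  (schedules.zip timelogs).foldl (fun answer p =>
    let limit := time_to_minutes p.1 + 10
    let latest := (PySem.List.pyRange 0 7 1).foldl (fun acc i =>
      if i ≠ saturday ∧ i ≠ sunday then
        match acc with
        | none => some (PySem.List.pyGetD p.2 i 0)
        | some l =>
          if PySem.List.pyGetD p.2 i 0 > l then some (PySem.List.pyGetD p.2 i 0) else some l
      else acc) none
    match latest with
    | some v => if time_to_minutes v ≤ limit then answer + 1 else answer
    | none => answer  -- unreachable: 5 of the 7 indices always pass the filter (Python would raise TypeError)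
    ) 0

-- ===== PRECONDITION & SPEC =====
-- Pre_ excludes exactly the inputs where Python A raises IndexError on log[i]: a timelog row
-- paired with a schedule that is shorter than the largest weekday index A reads
-- (7 entries needed in general; 6 when saturday lands on index 6, 5 when it lands on index 5).
def Pre_solution (schedules : List Int) (timelogs : List (List Int)) (startday : Int) : Prop :=
  ∀ p ∈ schedules.zip timelogs,
    (if PySem.Int.mod (6 - startday) 7 = 5 then 5
     else if PySem.Int.mod (6 - startday) 7 = 6 then 6 else 7) ≤ (p.2.length : Int)
instance (schedules : List Int) (timelogs : List (List Int)) (startday : Int) : Decidable (Pre_solution schedules timelogs startday) := by unfold Pre_solution; infer_instance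

def pvWitness_solution : List Int × List (List Int) × Int :=
  ([600], [[900, 900, 900, 900, 900, 900, 900]], 5)

def Spec_solution (schedules : List Int) (timelogs : List (List Int)) (startday : Int) (out : Int) : Prop := out = solution_alt schedules timelogs startday
instance (schedules : List Int) (timelogs : List (List Int)) (startday : Int) (out : Int) : Decidable (Spec_solution schedules timelogs startday out) := by unfold Spec_solution; infer_instance

-- ===== CLAIM (what is proved, stated in full; the proofs are below) =====
def Claim_equal_solution : Prop := ∀ (schedules : List Int) (timelogs : List (List Int)) (startday : Int), Dom_solution schedules timelogs startday → Pre_solution schedules timelogs startday → Spec_solution schedules timelogs startday (solution schedules timelogs startday)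

-- ===== LEMMAS AND PROOFS =====

-- one step of B's running max with a non-empty accumulator is a max
theorem pv_step_max (a b : Int) :
    (if b > a then (some b : Option Int) else some a) = some (max a b) := by
  split_ifs with h <;> simp [max_def] <;> omega

-- head of a reverse-sorted non-empty list is the running max of its elements
theorem pv_head_sorted_rev (x : Int) (t : List Int) :
    PySem.List.pyGetD (PySem.List.sorted (x :: t) (fun y => y) true) 0 0 = t.foldl max x := by
  have hne : PySem.List.sorted (x :: t) (fun y => y) true ≠ [] := by
    simp [PySem.List.sorted_eq_nil_iff]
  rcases hS : PySem.List.sorted (x :: t) (fun y => y) true with _ | ⟨m, rest⟩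
  · exact absurd hS hne
  have hmem : m ∈ x :: t := by
    have hp := PySem.List.sorted_perm (xs := x :: t) (key := fun y => y) (rev := true)
    rw [hS] at hp
    exact hp.mem_iff.mp (by simp)
  have hub : ∀ y ∈ x :: t, y ≤ m := PySem.List.key_head_sorted_rev_ge _ _ hS
  have hle : m ≤ t.foldl max x := by
    rcases List.mem_cons.mp hmem with h | h
    · rw [h]; exact (PySem.List.le_foldl_max t x).1
    · exact (PySem.List.le_foldl_max t x).2 m h
  have hge : t.foldl max x ≤ m := by
    rcases PySem.List.foldl_max_mem t x with h | h
    · rw [h]; exact hub x List.mem_cons_self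
    · exact hub _ (List.mem_cons_of_mem _ h)
  have hm : m = t.foldl max x := le_antisymm hle hge
  simp [PySem.List.pyGetD, hm]

-- B's inner loop with a some-accumulator is a running max over the filtered, indexed values
theorem pv_L1 (s su a : Int) (g : Int → Int) (is : List Int) :
    is.foldl (fun acc i =>
      if i ≠ s ∧ i ≠ su then
        match acc with
        | none => some (g i)
        | some l => if g i > l then some (g i) else some l
      else acc) (some a)
    = some (((is.filter (fun i => decide (i ≠ s ∧ i ≠ su))).map g).foldl max a) := by
  induction is generalizing a with
  | nil => simp
  | cons i t ih =>
    simp only [List.foldl_cons]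
    by_cases h : i ≠ s ∧ i ≠ su
    · rw [if_pos h, pv_step_max, ih,
        List.filter_cons_of_pos (p := fun j => decide (j ≠ s ∧ j ≠ su)) (by simpa using h),
        List.map_cons, List.foldl_cons]
    · rw [if_neg h, ih,
        List.filter_cons_of_neg (p := fun j => decide (j ≠ s ∧ j ≠ su)) (by simpa using h)]

-- B's inner loop from none: none iff nothing passes the filter, else the running max
theorem pv_L2 (s su : Int) (g : Int → Int) (is : List Int) :
    is.foldl (fun acc i =>
      if i ≠ s ∧ i ≠ su then
        match acc with
        | none => some (g i)
        | some l => if g i > l then some (g i) else some l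
      else acc) none
    = (match (is.filter (fun i => decide (i ≠ s ∧ i ≠ su))).map g with
      | [] => none
      | x :: t => some (t.foldl max x)) := by
  induction is with
  | nil => simp
  | cons i t ih =>
    simp only [List.foldl_cons]
    by_cases h : i ≠ s ∧ i ≠ su
    · rw [if_pos h, pv_L1,
        List.filter_cons_of_pos (p := fun j => decide (j ≠ s ∧ j ≠ su)) (by simpa using h),
        List.map_cons]
    · rw [if_neg h, ih,
        List.filter_cons_of_neg (p := fun j => decide (j ≠ s ∧ j ≠ su)) (by simpa using h)]

-- per-employee bodies agree, for any saturday index s ∈ [0, 7)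
theorem pv_body_eq (s su : Int) (h0 : 0 ≤ s) (h7 : s < 7)
    (hsu : su = PySem.Int.mod (s + 1) 7) (log : List Int) (limit answer : Int) :
    (if time_to_minutes (PySem.List.pyGetD
        (PySem.List.sorted (((PySem.List.pyRange 0 7 1).filter
          (fun i => !(s == i || PySem.Int.mod (s + 1) 7 == i))).map
          (fun i => PySem.List.pyGetD log i 0)) (fun x => x) true) 0 0) ≤ limit
      then answer + 1 else answer) =
    (match (PySem.List.pyRange 0 7 1).foldl (fun acc i =>
        if i ≠ s ∧ i ≠ su then
          match acc with
          | none => some (PySem.List.pyGetD log i 0)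
          | some l =>
            if PySem.List.pyGetD log i 0 > l then some (PySem.List.pyGetD log i 0) else some l
        else acc) none with
      | some v => if time_to_minutes v ≤ limit then answer + 1 else answer
      | none => answer) := by
  rw [← hsu]
  have hpred : (fun i : Int => !(s == i || su == i)) = (fun i => decide (i ≠ s ∧ i ≠ su)) := by
    funext i
    by_cases h1 : i = s
    · subst h1; simp
    · by_cases h2 : i = su
      · subst h2; simp
      · simp [h1, h2, beq_eq_false_iff_ne, Ne.symm h1, Ne.symm h2]
  rw [hpred, pv_L2]
  have hsu0 : 0 ≤ su := hsu ▸ PySem.Int.mod_nonneg _ (by norm_num)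
  have hsu7 : su < 7 := hsu ▸ PySem.Int.mod_lt _ (by norm_num)
  have hrel : PySem.Int.floordiv (s + 1) 7 * 7 + su = s + 1 := by
    rw [hsu]; exact PySem.Int.floordiv_mul_add_mod (s + 1) 7
  have hF : (PySem.List.pyRange 0 7 1).filter (fun i => decide (i ≠ s ∧ i ≠ su)) ≠ [] := by
    intro hnil
    rw [List.filter_eq_nil_iff] at hnil
    have m0 := hnil 0 (by rw [PySem.List.mem_pyRange_one]; norm_num)
    have m1 := hnil 1 (by rw [PySem.List.mem_pyRange_one]; norm_num)
    have m2 := hnil 2 (by rw [PySem.List.mem_pyRange_one]; norm_num)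
    simp only [decide_eq_true_eq, not_and_or, not_not] at m0 m1 m2
    omega
  rcases hfil : (PySem.List.pyRange 0 7 1).filter (fun i => decide (i ≠ s ∧ i ≠ su)) with _ | ⟨x, t⟩
  · exact absurd hfil hF
  simp only [List.map_cons, pv_head_sorted_rev, List.foldl_map]

-- ===== VERDICT (by name: the statement is the Claim_ definition above) =====
theorem solution_spec : Claim_equal_solution := by
  intro schedules timelogs startday _ _
  unfold Spec_solution solution solution_alt
  have h0 : 0 ≤ PySem.Int.mod (6 - startday) 7 := PySem.Int.mod_nonneg _ (by norm_num)
  have h7 : PySem.Int.mod (6 - startday) 7 < 7 := PySem.Int.mod_lt _ (by norm_num)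
  refine List.foldl_ext _ _ 0 ?_
  intro answer p _
  dsimp only
  exact pv_body_eq _ _ h0 h7 rfl p.2 _ answer
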